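-- pv_equiv track=rewrite | github.com/flagboy/mahjong-table-group-generator | table_group_optimal.py | _select_initial_table
-- ===== SOURCE A (Python) =====
-- from typing import List, Dict, Tuple, Set, Optional
--
-- def _select_initial_table(players: List[int],
--                         pair_count: Dict[Tuple[int, int], int]) -> List[int]:
--     """最初の卓を選択（多様性のため）"""
--     # ペア回数が最小のプレイヤーから開始
--     min_pair_sum = float('inf')
--     best_player = players[0]
--
--     for p in players:
--         pair_sum = sum(pair_count.get(tuple(sorted([p, other])), 0)
--                       for other in players if other != p)
--         if pair_sum < min_pair_sum:
--             min_pair_sum = pair_sum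
--             best_player = p
--
--     # そのプレイヤーと最も同卓していない3人を選択
--     candidates = [p for p in players if p != best_player]
--     candidates.sort(key=lambda x: pair_count.get(tuple(sorted([best_player, x])), 0))
--
--     return [best_player] + candidates[:3]
-- ===== SOURCE B (Python) =====
-- from typing import List, Dict, Tuple
--
-- def _select_initial_table(players: List[int],
--                         pair_count: Dict[Tuple[int, int], int]) -> List[int]:
--     """最初の卓を選択（多様性のため）— one pass over pair_count instead of rescanning all pairs"""
--     # multiplicity of each player value (players may in principle repeat)
--     mult = {}
--     for p in players:
--         mult[p] = mult.get(p, 0) + 1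
--
--     # per-player pairing totals, accumulated in one pass over pair_count
--     totals = {p: 0 for p in mult}
--     for key, c in pair_count.items():
--         if len(key) == 2:
--             a, b = key
--             if a < b and a in mult and b in mult:
--                 totals[a] += c * mult[b]
--                 totals[b] += c * mult[a]
--
--     best_player = min(players, key=lambda p: totals[p])
--
--     # counts of best_player with each partner, read off pair_count in one pass
--     by_best = {}
--     for key, c in pair_count.items():
--         if len(key) == 2:
--             a, b = key
--             if a < b:
--                 if a == best_player:
--                     by_best[b] = c
--                 elif b == best_player:
--                     by_best[a] = c
--
--     candidates = sorted((p for p in players if p != best_player),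
--                         key=lambda x: by_best.get(x, 0))
--     return [best_player] + candidates[:3]
-- ===== Notes on version B (the rewrite author's own statement) =====
-- stated objective: faster
-- what changed: Instead of recomputing, for every player, a sum over all other players (a quadratic rescan of all pairs), B makes one pass over pair_count accumulating per-player pairing totals (weighted by player multiplicities), picks the first minimal player with min(), and reads the best player's pairing row off pair_count in one more pass before the stable sort.
import Mathlib
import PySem

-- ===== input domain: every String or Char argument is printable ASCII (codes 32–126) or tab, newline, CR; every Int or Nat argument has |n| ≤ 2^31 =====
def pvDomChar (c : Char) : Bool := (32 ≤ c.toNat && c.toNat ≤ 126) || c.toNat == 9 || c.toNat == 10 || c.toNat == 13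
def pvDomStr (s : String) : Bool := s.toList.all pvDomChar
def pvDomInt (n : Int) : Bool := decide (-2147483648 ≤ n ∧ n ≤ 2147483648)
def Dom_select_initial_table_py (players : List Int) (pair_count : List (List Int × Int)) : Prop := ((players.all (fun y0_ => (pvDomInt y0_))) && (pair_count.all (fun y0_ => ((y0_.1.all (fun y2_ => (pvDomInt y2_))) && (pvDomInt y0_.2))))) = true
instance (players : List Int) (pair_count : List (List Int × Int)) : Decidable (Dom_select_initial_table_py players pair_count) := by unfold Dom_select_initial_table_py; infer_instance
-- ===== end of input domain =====

-- B accumulates each player's pairing total in ONE pass over pair_count (and reads the best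
-- player's row off pair_count in one more pass) instead of re-scanning all players for every
-- player; objective: faster.

-- ===== PORT A =====
-- tuple(sorted([p, other])) for two ints
def pvSortedPair (p o : Int) : List Int := if p ≤ o then [p, o] else [o, p]

-- sum(pair_count.get(tuple(sorted([p, other])), 0) for other in players if other != p)
def pvPairSum (players : List Int) (pc : PySem.Dict (List Int) Int) (p : Int) : Int :=
  ((players.filter (fun o => decide (o ≠ p))).map (fun o => pc.getD (pvSortedPair p o) 0)).sum

def select_initial_table_py (players : List Int) (pair_count : List (List Int × Int)) : List Int :=
  match players with
  | [] => []    -- players[0] raises IndexError in Python: excluded by Pre_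
  | p0 :: _ =>
    let pc : PySem.Dict (List Int) Int := PySem.Dict.mk pair_count
    -- min_pair_sum = inf (none); best_player = players[0]; for p in players: …
    let st := players.foldl
      (fun (st : Option Int × Int) p =>
        let pair_sum := pvPairSum players pc p
        match st.1 with
        | none => (some pair_sum, p)            -- pair_sum < inf is always true
        | some m => if pair_sum < m then (some pair_sum, p) else st)
      ((none : Option Int), p0)
    let best := st.2
    let candidates := players.filter (fun x => decide (x ≠ best))
    best :: (PySem.List.sorted candidates (fun x => pc.getD (pvSortedPair best x) 0) false).take 3

-- ===== PORT B =====
def select_initial_table_py_alt (players : List Int) (pair_count : List (List Int × Int)) : List Int :=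
  match players with
  | [] => []    -- min([]) raises ValueError in Python B: excluded by Pre_
  | _ :: _ =>
    -- mult[p] = mult.get(p, 0) + 1
    let mult : PySem.Dict Int Int :=
      players.foldl (fun d p => d.insert p (d.getD p 0 + 1)) PySem.Dict.empty
    -- totals = {p: 0 for p in mult}
    let totals0 : PySem.Dict Int Int :=
      mult.keys.foldl (fun d k => d.insert k 0) PySem.Dict.empty
    -- one pass over pair_count.items()
    let totals : PySem.Dict Int Int := pair_count.foldl
      (fun t kv =>
        match kv.1 with
        | [a, b] =>
          if decide (a < b) && mult.contains a && mult.contains b then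
            (t.modify a 0 (· + kv.2 * mult.getD b 0)).modify b 0 (· + kv.2 * mult.getD a 0)
          else t
        | _ => t)
      totals0
    match PySem.List.min? players (fun p => totals.getD p 0) with
    | none => []
    | some best =>
      -- by_best read off pair_count in one pass
      let byBest : PySem.Dict Int Int := pair_count.foldl
        (fun d kv =>
          match kv.1 with
          | [a, b] =>
            if a < b then
              if a = best then d.insert b kv.2
              else if b = best then d.insert a kv.2
              else d
            else d
          | _ => d)
        PySem.Dict.empty
      let candidates := players.filter (fun x => decide (x ≠ best))
      best :: (PySem.List.sorted candidates (fun x => byBest.getD x 0) false).take 3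

-- ===== PRECONDITION & SPEC =====
-- Pre_ excludes the empty player list (A raises IndexError on players[0]; B's min() raises
-- ValueError) and association lists with duplicate keys, which cannot arise from a Python dict.
def Pre_select_initial_table_py (players : List Int) (pair_count : List (List Int × Int)) : Prop :=
  players ≠ [] ∧ (pair_count.map (·.1)).Nodup

instance (players : List Int) (pair_count : List (List Int × Int)) : Decidable (Pre_select_initial_table_py players pair_count) := by unfold Pre_select_initial_table_py; infer_instance

def pvWitness_select_initial_table_py : List Int × (List (List Int × Int)) :=
  ([1, 2, 3, 4, 5], [([1, 2], 3), ([2, 3], 1)])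

def Spec_select_initial_table_py (players : List Int) (pair_count : List (List Int × Int)) (out : List Int) : Prop := out = select_initial_table_py_alt players pair_count
instance (players : List Int) (pair_count : List (List Int × Int)) (out : List Int) : Decidable (Spec_select_initial_table_py players pair_count out) := by unfold Spec_select_initial_table_py; infer_instance

-- ===== CLAIM (what is proved, stated in full; the proofs are below) =====
def Claim_equal_select_initial_table_py : Prop := ∀ (players : List Int) (pair_count : List (List Int × Int)), Dom_select_initial_table_py players pair_count → Pre_select_initial_table_py players pair_count → Spec_select_initial_table_py players pair_count (select_initial_table_py players pair_count)

-- ===== LEMMAS AND PROOFS =====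

def pvContrib (players : List Int) (p : Int) (kv : List Int × Int) : Int :=
  match kv.1 with
  | [a, b] =>
    if a < b then
      (if p = a then kv.2 * players.count b else if p = b then kv.2 * players.count a else 0)
    else 0
  | _ => 0

theorem spair_eq_left {a b o : Int} (hab : a < b) : ([a,b] = pvSortedPair a o) ↔ o = b := by
  unfold pvSortedPair; split_ifs with h <;> simp [List.cons.injEq] <;> omega
theorem spair_eq_right {a b o : Int} (hab : a < b) : ([a,b] = pvSortedPair b o) ↔ o = a := by
  unfold pvSortedPair; split_ifs with h <;> simp [List.cons.injEq] <;> omega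
theorem spair_ne_other {a b p o : Int} (hpa : p ≠ a) (hpb : p ≠ b) :
    [a,b] ≠ pvSortedPair p o := by
  unfold pvSortedPair; split_ifs with h <;> simp [List.cons.injEq] <;> omega
theorem spair_ne_nonlt {a b p o : Int} (hab : ¬ a < b) (hop : o ≠ p) :
    [a,b] ≠ pvSortedPair p o := by
  unfold pvSortedPair; split_ifs with h <;> simp [List.cons.injEq] <;> omega
theorem spair_ne_len {k : List Int} (h : ∀ a b : Int, k ≠ [a, b]) (p o : Int) :
    k ≠ pvSortedPair p o := by
  unfold pvSortedPair; split_ifs <;> apply h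

theorem pv_sum_ite_count (L : List Int) (b c : Int) :
    (L.map (fun o => if o = b then c else 0)).sum = c * L.count b := by
  induction L with
  | nil => simp
  | cons x t ih =>
    simp only [List.map_cons, List.sum_cons, ih, List.count_cons]
    by_cases h : x = b
    · simp [h]; ring
    · simp [h]

theorem pv_count_filter_ne (L : List Int) (b p : Int) (h : b ≠ p) :
    (L.filter (fun o => decide (o ≠ p))).count b = L.count b := by
  rw [List.count_filter]; simp [h]

theorem pv_entry_sum (players : List Int) (p : Int) (k : List Int) (c : Int) :
    ((players.filter (fun o => decide (o ≠ p))).map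
      (fun o => if k = pvSortedPair p o then c else 0)).sum = pvContrib players p (k, c) := by
  match k with
  | [a, b] =>
    simp only [pvContrib]
    by_cases hab : a < b
    · rw [if_pos hab]
      by_cases hpa : p = a
      · subst hpa
        rw [if_pos rfl,
          List.map_congr_left (g := fun o => if o = b then c else 0)
            (fun o _ => by rw [show ((if [p,b] = pvSortedPair p o then c else 0)
              = if o = b then c else 0) from by simp only [spair_eq_left hab]]),
          pv_sum_ite_count, pv_count_filter_ne players b p (by omega)]
      · by_cases hpb : p = b
        · subst hpb
          rw [if_neg hpa, if_pos rfl,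
            List.map_congr_left (g := fun o => if o = a then c else 0)
              (fun o _ => by simp only [spair_eq_right hab]),
            pv_sum_ite_count, pv_count_filter_ne players a p (by omega)]
        · rw [if_neg hpa, if_neg hpb,
            List.map_congr_left (g := fun _ => 0)
              (fun o _ => by simp only [if_neg (spair_ne_other hpa hpb)])]
          simp
    · rw [if_neg hab,
        List.map_congr_left (g := fun _ => 0)
          (fun o ho => by
            have hop : o ≠ p := by simpa using (List.of_mem_filter ho)
            simp only [if_neg (spair_ne_nonlt hab hop)])]
      simp
  | [] =>
    simp only [pvContrib]
    rw [List.map_congr_left (g := fun _ => 0)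
      (fun o _ => by simp only [if_neg (spair_ne_len (k := []) (by intro x y h; exact List.cons_ne_nil x [y] h.symm) p o)])]
    simp
  | [a] =>
    simp only [pvContrib]
    rw [List.map_congr_left (g := fun _ => 0)
      (fun o _ => by simp only [if_neg (spair_ne_len (k := [a]) (by intro x y h; injection h with h1 h2; exact List.cons_ne_nil y [] h2.symm) p o)])]
    simp
  | a :: b :: d :: t =>
    simp only [pvContrib]
    rw [List.map_congr_left (g := fun _ => 0)
      (fun o _ => by simp only [if_neg (spair_ne_len (k := a :: b :: d :: t) (by intro x y h; injection h with h1 h2; injection h2 with h3 h4; exact List.cons_ne_nil d t h4) p o)])]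
    simp

theorem pv_pairSum_eq (players : List Int) (l : List (List Int × Int))
    (hnd : (l.map (·.1)).Nodup) (p : Int) :
    pvPairSum players (PySem.Dict.mk l) p = (l.map (pvContrib players p)).sum := by
  induction l with
  | nil =>
    simp [pvPairSum, PySem.Dict.getD, PySem.Dict.get?]
  | cons kv rest ih =>
    simp only [List.map_cons, List.nodup_cons] at hnd
    have hnotin : kv.1 ∉ rest.map (·.1) := hnd.1
    have hrest0 : ∀ k : List Int, k = kv.1 → (PySem.Dict.mk rest).getD k 0 = 0 := by
      intro k hk
      subst hk
      apply PySem.Dict.getD_of_not_contains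
      rw [← Bool.not_eq_true, PySem.Dict.contains_iff_mem_keys]
      simpa [PySem.Dict.keys] using hnotin
    have hstep : ∀ o : Int,
        (PySem.Dict.mk (kv :: rest)).getD (pvSortedPair p o) 0
          = (if kv.1 = pvSortedPair p o then kv.2 else 0)
            + (PySem.Dict.mk rest).getD (pvSortedPair p o) 0 := by
      intro o
      rw [PySem.Dict.getD_eq_get?_getD, PySem.Dict.get?_mk_cons]
      by_cases h : kv.1 = pvSortedPair p o
      · rw [if_pos ((beq_iff_eq).2 h), if_pos h, Option.getD_some,
          hrest0 (pvSortedPair p o) h.symm, add_zero]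
      · rw [if_neg (by simpa using h), if_neg h, zero_add, PySem.Dict.getD_eq_get?_getD]
    unfold pvPairSum
    rw [List.map_congr_left (g := fun o =>
        (if kv.1 = pvSortedPair p o then kv.2 else 0)
          + (PySem.Dict.mk rest).getD (pvSortedPair p o) 0)
      (fun o _ => hstep o)]
    rw [PySem.List.sum_map_add_int]
    rw [pv_entry_sum players p kv.1 kv.2]
    rw [show ((players.filter (fun o => decide (o ≠ p))).map
        (fun o => (PySem.Dict.mk rest).getD (pvSortedPair p o) 0)).sum
      = pvPairSum players (PySem.Dict.mk rest) p from rfl]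
    rw [ih hnd.2]
    simp

-- ===== B-side lemmas =====
theorem pv_mult_getD (players : List Int) (b : Int) :
    ((players.foldl (fun d p => d.insert p (d.getD p 0 + 1))
        (PySem.Dict.empty : PySem.Dict Int Int)).getD b 0)
      = (players.count b : Int) := by
  have h := PySem.Dict.getD_foldl_insert_add_one players
    (PySem.Dict.empty : PySem.Dict Int Int) b
  simpa using h

theorem pv_mult_contains (players : List Int) (a : Int) :
    ((players.foldl (fun d p => d.insert p (d.getD p 0 + 1))
        (PySem.Dict.empty : PySem.Dict Int Int)).contains a)
      = decide (a ∈ players) := by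
  by_cases h : a ∈ players
  · simp only [h, decide_true]
    rw [PySem.Dict.contains_iff_mem_keys, PySem.Dict.keys_foldl_insert,
      PySem.Dict.keys_empty, PySem.Set.update_nil_left]
    exact (PySem.Set.mem_ofList players a).2 h
  · simp only [h, decide_false]
    rw [← Bool.not_eq_true, PySem.Dict.contains_iff_mem_keys, PySem.Dict.keys_foldl_insert,
      PySem.Dict.keys_empty, PySem.Set.update_nil_left]
    intro hmem
    exact h ((PySem.Set.mem_ofList players a).1 hmem)

theorem pv_totals0_getD (ks : List Int) (d : PySem.Dict Int Int)
    (hd : ∀ q, d.getD q 0 = 0) (q : Int) :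
    (ks.foldl (fun d k => d.insert k 0) d).getD q 0 = 0 := by
  induction ks generalizing d with
  | nil => exact hd q
  | cons k t ih =>
    simp only [List.foldl_cons]
    exact ih _ (fun q' => by rw [PySem.Dict.getD_insert]; split <;> simp [hd])

theorem pv_totals_fold (players : List Int) (mult : PySem.Dict Int Int)
    (hget : ∀ b, mult.getD b 0 = (players.count b : Int))
    (hcont : ∀ a, mult.contains a = decide (a ∈ players))
    (l : List (List Int × Int)) (t : PySem.Dict Int Int) (p : Int) (hp : p ∈ players) :
    ((l.foldl (fun t kv =>
        match kv.1 with
        | [a, b] =>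
          if decide (a < b) && mult.contains a && mult.contains b then
            (t.modify a 0 (· + kv.2 * mult.getD b 0)).modify b 0 (· + kv.2 * mult.getD a 0)
          else t
        | _ => t) t).getD p 0)
      = t.getD p 0 + (l.map (pvContrib players p)).sum := by
  induction l generalizing t with
  | nil => simp
  | cons kv rest ih =>
    simp only [List.foldl_cons, List.map_cons, List.sum_cons]
    rw [ih]
    have hstep : (match kv.1 with
        | [a, b] =>
          if decide (a < b) && mult.contains a && mult.contains b then
            (t.modify a 0 (· + kv.2 * mult.getD b 0)).modify b 0 (· + kv.2 * mult.getD a 0)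
          else t
        | _ => t).getD p 0 = t.getD p 0 + pvContrib players p kv := by
      rcases kv with ⟨k, c⟩
      match k with
      | [a, b] =>
        simp only [pvContrib]
        by_cases hab : a < b
        · rw [if_pos hab]
          have hne : ¬ (b = a) := by omega
          by_cases hca : a ∈ players
          · by_cases hcb : b ∈ players
            · rw [show (decide (a < b) && mult.contains a && mult.contains b) = true by
                simp [hab, hcont, hca, hcb]]
              simp only [if_true, PySem.Dict.getD_modify, hget]
              split_ifs <;> simp_all
            · rw [show (decide (a < b) && mult.contains a && mult.contains b) = false by
                simp [hcont, hcb]]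
              simp only [Bool.false_eq_true, if_false]
              have hpb : ¬ p = b := fun h => hcb (h ▸ hp)
              have hcnt : players.count b = 0 := List.count_eq_zero.2 hcb
              by_cases hpa : p = a
              · rw [if_pos hpa, hcnt]; simp
              · rw [if_neg hpa, if_neg hpb, add_zero]
          · rw [show (decide (a < b) && mult.contains a && mult.contains b) = false by
              simp [hcont, hca]]
            simp only [Bool.false_eq_true, if_false]
            have hpa : ¬ p = a := fun h => hca (h ▸ hp)
            have hcnt : players.count a = 0 := List.count_eq_zero.2 hca
            by_cases hpb : p = b
            · rw [if_neg hpa, if_pos hpb, hcnt]; simp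
            · rw [if_neg hpa, if_neg hpb, add_zero]
        · rw [show (decide (a < b) && mult.contains a && mult.contains b) = false by
            simp [hab]]
          simp only [Bool.false_eq_true, if_false, if_neg hab, add_zero]
      | [] => simp [pvContrib]
      | [a] => simp [pvContrib]
      | a :: b :: d :: ts => simp [pvContrib]
    rw [hstep]
    ring

def pvMinD (f : Int → Int) (l : List Int) (b : Int) : Int :=
  l.foldl (fun m x => if f x < f m then x else m) b

theorem pv_loopA (f : Int → Int) (l : List Int) : ∀ b : Int,
    (l.foldl (fun (st : Option Int × Int) p =>
        match st.1 with
        | none => (some (f p), p)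
        | some m => if f p < m then (some (f p), p) else st) (some (f b), b))
      = (some (f (pvMinD f l b)), pvMinD f l b) := by
  induction l with
  | nil => intro b; simp [pvMinD]
  | cons x t ih =>
    intro b
    simp only [List.foldl_cons, pvMinD]
    by_cases h : f x < f b
    · simpa [h, pvMinD] using ih x
    · simpa [h, pvMinD] using ih b

theorem pv_min?_cons (g : Int → Int) (l : List Int) : ∀ b : Int,
    PySem.List.min? (b :: l) g = some (pvMinD g l b) := by
  induction l with
  | nil => intro b; simp [PySem.List.min?, pvMinD]
  | cons x t ih =>
    intro b
    have h1 : PySem.List.min? (b :: x :: t) g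
        = PySem.List.min? ((if g x < g b then x else b) :: t) g := by
      simp only [PySem.List.min?, List.foldl_cons]
      by_cases h : g x < g b <;> simp [h]
    rw [h1]
    by_cases h : g x < g b
    · rw [if_pos h, ih x]
      simp [pvMinD, h]
    · rw [if_neg h, ih b]
      simp [pvMinD, h]

theorem pvMinD_congr (f g : Int → Int) (l : List Int) :
    ∀ b : Int, (∀ x ∈ l, f x = g x) → f b = g b → pvMinD f l b = pvMinD g l b := by
  induction l with
  | nil => intro b _ _; rfl
  | cons x t ih =>
    intro b hl hb
    have hx : f x = g x := hl x (by simp)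
    simp only [pvMinD, List.foldl_cons]
    by_cases h : g x < g b
    · rw [if_pos (show f x < f b by rw [hx, hb]; exact h), if_pos h]
      simpa [pvMinD] using ih x (fun y hy => hl y (by simp [hy])) hx
    · rw [if_neg (show ¬ f x < f b by rw [hx, hb]; exact h), if_neg h]
      simpa [pvMinD] using ih b (fun y hy => hl y (by simp [hy])) hb

theorem pv_insertBy_congr (c1 c2 : Int → Int → Bool) (x : Int) (ys : List Int)
    (h : ∀ y ∈ ys, c1 x y = c2 x y) :
    PySem.List.insertBy c1 x ys = PySem.List.insertBy c2 x ys := by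
  induction ys with
  | nil => rfl
  | cons y t ih =>
    have hy : c1 x y = c2 x y := h y (by simp)
    simp only [PySem.List.insertBy]
    rw [hy]
    by_cases hc : c2 x y = true
    · simp [hc]
    · simp only [Bool.not_eq_true] at hc
      simp [hc, ih (fun z hz => h z (by simp [hz]))]

theorem pv_sorted_congr (xs : List Int) (k1 k2 : Int → Int)
    (h : ∀ x ∈ xs, k1 x = k2 x) :
    PySem.List.sorted xs k1 false = PySem.List.sorted xs k2 false := by
  rw [PySem.List.sorted_eq_foldl_insertBy, PySem.List.sorted_eq_foldl_insertBy]
  have aux : ∀ (l : List Int) (acc : List Int),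
      (∀ x ∈ l, k1 x = k2 x) → (∀ y ∈ acc, k1 y = k2 y) →
      l.foldl (fun acc x => PySem.List.insertBy (fun a b => decide (k1 a < k1 b)) x acc) acc
        = l.foldl (fun acc x => PySem.List.insertBy (fun a b => decide (k2 a < k2 b)) x acc) acc := by
    intro l
    induction l with
    | nil => intro acc _ _; rfl
    | cons x t ih =>
      intro acc hl hacc
      have hx : k1 x = k2 x := hl x (by simp)
      simp only [List.foldl_cons]
      rw [pv_insertBy_congr _ (fun a b => decide (k2 a < k2 b)) x acc
        (fun y hy => by rw [hx, hacc y hy])]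
      exact ih _ (fun y hy => hl y (by simp [hy]))
        (fun y hy => by
          rcases (PySem.List.mem_insertBy _ x y acc).1 hy with h1 | h1
          · rw [h1]; exact hx
          · exact hacc y h1)
  exact aux xs [] h (by simp)

theorem pv_byBest (best x : Int) (hx : ¬ x = best) :
    ∀ (l : List (List Int × Int)) (d : PySem.Dict Int Int), (l.map (·.1)).Nodup →
    ((l.foldl (fun d kv =>
        match kv.1 with
        | [a, b] =>
          if a < b then
            if a = best then d.insert b kv.2
            else if b = best then d.insert a kv.2
            else d
          else d
        | _ => d) d).getD x 0)
      = (match (PySem.Dict.mk l).get? (pvSortedPair best x) with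
         | some c => c
         | none => d.getD x 0) := by
  intro l
  induction l with
  | nil =>
    intro d _
    simp [PySem.Dict.get?]
  | cons kv rest ih =>
    intro d hnd
    simp only [List.map_cons, List.nodup_cons] at hnd
    simp only [List.foldl_cons]
    by_cases hk : kv.1 = pvSortedPair best x
    · -- this entry is exactly the pair {best, x}: the step inserts x ↦ kv.2
      have hstep : (match kv.1 with
          | [a, b] =>
            if a < b then
              if a = best then d.insert b kv.2
              else if b = best then d.insert a kv.2
              else d
            else d
          | _ => d) = d.insert x kv.2 := by
        rw [hk]
        unfold pvSortedPair
        by_cases hbx : best ≤ x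
        · have hlt : best < x := by omega
          simp only [if_pos hbx]
          rw [if_pos hlt]
          simp
        · have hlt : x < best := by omega
          simp only [if_neg hbx]
          rw [if_pos hlt, if_neg hx]
          simp
      rw [hstep, ih _ hnd.2]
      have hnone : (PySem.Dict.mk rest).get? (pvSortedPair best x) = none := by
        rw [PySem.Dict.get?_eq_none_iff_not_mem_keys]
        intro hmem
        exact hnd.1 (by simpa [PySem.Dict.keys, hk] using hmem)
      rw [hnone, PySem.Dict.get?_mk_cons, if_pos (by simpa using hk)]
      simp
    · -- a different key: slot x is untouched by this step
      have hstep : ((match kv.1 with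
          | [a, b] =>
            if a < b then
              if a = best then d.insert b kv.2
              else if b = best then d.insert a kv.2
              else d
            else d
          | _ => d) : PySem.Dict Int Int).getD x 0 = d.getD x 0 := by
        rcases kv with ⟨k, c⟩
        match k with
        | [a, b] =>
          simp only at hk ⊢
          by_cases hab : a < b
          · rw [if_pos hab]
            by_cases ha : a = best
            · rw [if_pos ha]
              have hbx2 : ¬ x = b := by
                intro hxb
                apply hk
                subst ha hxb
                unfold pvSortedPair
                rw [if_pos (by omega : a ≤ x)]
              rw [PySem.Dict.getD_insert, if_neg hbx2]
            · rw [if_neg ha]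
              by_cases hb : b = best
              · rw [if_pos hb]
                have hax2 : ¬ x = a := by
                  intro hxa
                  apply hk
                  subst hb hxa
                  unfold pvSortedPair
                  rw [if_neg (by omega : ¬ b ≤ x)]
                rw [PySem.Dict.getD_insert, if_neg hax2]
              · rw [if_neg hb]
          · rw [if_neg hab]
        | [] => rfl
        | [a] => rfl
        | a :: b :: e :: ts => rfl
      -- the fold over rest sees the same accumulator slot, and this key is not the lookup key
      have ihr := ih ((match kv.1 with
          | [a, b] =>
            if a < b then
              if a = best then d.insert b kv.2
              else if b = best then d.insert a kv.2
              else d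
            else d
          | _ => d) : PySem.Dict Int Int) hnd.2
      rw [ihr, PySem.Dict.get?_mk_cons, if_neg (by simpa using hk)]
      cases hrest : (PySem.Dict.mk rest).get? (pvSortedPair best x) with
      | some c => rfl
      | none => exact hstep


theorem pv_main (p0 : Int) (rest : List Int) (pair_count : List (List Int × Int))
    (hnd : (pair_count.map (·.1)).Nodup) :
    select_initial_table_py (p0 :: rest) pair_count
      = select_initial_table_py_alt (p0 :: rest) pair_count := by
  simp only [select_initial_table_py, select_initial_table_py_alt]
  -- abbreviations
  set players : List Int := p0 :: rest with hplayers
  set pc : PySem.Dict (List Int) Int := PySem.Dict.mk pair_count with hpc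
  set fA : Int → Int := fun p => pvPairSum players pc p with hfA
  set mult : PySem.Dict Int Int :=
    List.foldl (fun d p => d.insert p (d.getD p 0 + 1)) PySem.Dict.empty players with hmult
  set totals0 : PySem.Dict Int Int :=
    List.foldl (fun d k => d.insert k 0) PySem.Dict.empty mult.keys with htotals0def
  set totals : PySem.Dict Int Int :=
    List.foldl (fun t kv =>
      match kv.1 with
      | [a, b] =>
        if decide (a < b) && mult.contains a && mult.contains b then
          (t.modify a 0 (· + kv.2 * mult.getD b 0)).modify b 0 (· + kv.2 * mult.getD a 0)
        else t
      | _ => t) totals0 pair_count with htotalsdef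
  set g : Int → Int := fun p => totals.getD p 0 with hgdef
  -- A's loop over players = one forced first step, then the strict-min fold
  have hAfold : (players.foldl
      (fun (st : Option Int × Int) p =>
        match st.1 with
        | none => (some (pvPairSum players pc p), p)
        | some m => if pvPairSum players pc p < m then (some (pvPairSum players pc p), p) else st)
      ((none : Option Int), p0))
      = (some (fA (pvMinD fA rest p0)), pvMinD fA rest p0) := by
    rw [hplayers, List.foldl_cons]
    exact pv_loopA fA rest p0
  rw [hAfold]
  -- B's per-player totals equal A's pair sums on players
  have hg : ∀ p ∈ players, g p = fA p := by
    intro p hp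
    rw [hgdef, hfA]
    simp only
    rw [htotalsdef, pv_totals_fold players mult
        (fun b => by rw [hmult]; exact pv_mult_getD players b)
        (fun a => by rw [hmult]; exact pv_mult_contains players a)
        pair_count totals0 p hp,
      htotals0def, pv_totals0_getD mult.keys PySem.Dict.empty (fun q => by simp) p, zero_add,
      hpc, pv_pairSum_eq players pair_count hnd p]
  -- B's min? is the same strict-min fold
  have hminB : PySem.List.min? players g = some (pvMinD g rest p0) := by
    rw [hplayers]; exact pv_min?_cons g rest p0
  rw [hminB]
  have hbesteq : pvMinD g rest p0 = pvMinD fA rest p0 :=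
    pvMinD_congr g fA rest p0 (fun x hx => hg x (by rw [hplayers]; exact List.mem_cons_of_mem _ hx))
      (hg p0 (by rw [hplayers]; exact List.mem_cons_self))
  simp only [hbesteq]
  congr 2
  apply pv_sorted_congr
  intro x hx
  have hxm : ¬ x = pvMinD fA rest p0 := by simpa using (List.of_mem_filter hx)
  rw [pv_byBest (pvMinD fA rest p0) x hxm pair_count PySem.Dict.empty hnd]
  rw [hpc, PySem.Dict.getD_eq_get?_getD]
  cases h : (PySem.Dict.mk pair_count).get? (pvSortedPair (pvMinD fA rest p0) x) with
  | some c => simp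
  | none => simp [PySem.Dict.getD_empty]

theorem select_initial_table_py_spec : Claim_equal_select_initial_table_py := by
  intro players pair_count _hdom hpre
  obtain ⟨hne, hnd⟩ := hpre
  unfold Spec_select_initial_table_py
  match players with
  | [] => exact absurd rfl hne
  | p0 :: rest => exact pv_main p0 rest pair_count hnd
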